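-- pv_equiv track=rewrite | github.com/matthewsilva/Simple-Python-Programs | 2D Path Finder/MatthewSilvaCSC110_Homework10_ArtificialIntelligence.py | closestDirt
-- ===== SOURCE A (Python) =====
-- def closestDirt(posr, posc, board):
--     dirtsR = []
--     dirtsC = []
--     distances = []
--     for r in range(5):      # For 5 rows
--         for c in range(5):  # For 5 columns
--             if board[r][c] == "d":  # Record positions of dirt spaces
--                 dirtsR.append(r)
--                 dirtsC.append(c)
--     if len(dirtsR) == 0:    # If no dirt spaces were found, return -1, -1
--         return -1, -1
--     for i in range(len(dirtsR)):    # Calculate distances from bot to dirts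
--         distances.append(abs(dirtsR[i] - posr) + abs(dirtsC[i] - posc))
--     minDist = distances[0]  # Initialize minimums
--     minDistIndex = 0
--     for i in range(len(distances)): # Find the closest dirt's index
--         if distances[i] < minDist:
--             minDist = distances[i]
--             minDistIndex = i                            # Return row and column
--     return dirtsR[minDistIndex], dirtsC[minDistIndex]   # of closest dirt
-- ===== SOURCE B (Python) =====
-- def closestDirt(posr, posc, board):
--     bestR = bestC = bestDist = None
--     for r in range(5):
--         for c in range(5):
--             if board[r][c] == "d":
--                 d = abs(r - posr) + abs(c - posc)
--                 if bestDist is None or d < bestDist: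
--                     bestDist, bestR, bestC = d, r, c
--     if bestR is None:
--         return -1, -1
--     return bestR, bestC
-- ===== Notes on version B (the rewrite author's own statement) =====
-- stated objective: simpler
-- what changed: Replaces A's three passes and the dirtsR/dirtsC/distances lists with a single row-major pass that keeps the running best (strict < keeps the first minimum), returning (-1,-1) if no dirt was seen.
import Mathlib
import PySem

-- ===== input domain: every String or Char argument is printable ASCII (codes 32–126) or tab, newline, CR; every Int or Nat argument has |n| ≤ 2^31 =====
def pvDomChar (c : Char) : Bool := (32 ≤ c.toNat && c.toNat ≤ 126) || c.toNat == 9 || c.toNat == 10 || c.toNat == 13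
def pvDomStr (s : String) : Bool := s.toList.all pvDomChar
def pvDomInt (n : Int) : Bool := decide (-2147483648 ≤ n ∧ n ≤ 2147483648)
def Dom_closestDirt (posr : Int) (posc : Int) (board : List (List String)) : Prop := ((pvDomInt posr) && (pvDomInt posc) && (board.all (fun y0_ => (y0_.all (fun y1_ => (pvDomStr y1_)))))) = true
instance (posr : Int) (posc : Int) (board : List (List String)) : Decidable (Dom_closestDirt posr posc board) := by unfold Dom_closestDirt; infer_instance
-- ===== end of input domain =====

-- B changes nothing observable: one row-major pass keeping the running best replaces A's
-- three passes and intermediate lists; equal return values proved on all 5x5-or-larger boards.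

-- ===== PORT A =====
-- literal transliteration: collect dirt coordinates, build the distance list, then scan for
-- the first index achieving the minimum (strict <), exactly as A does.
def closestDirt (posr : Int) (posc : Int) (board : List (List String)) : Int × Int :=
  let dirts : List (Int × Int) :=
    (List.range 5).foldl (fun acc r =>
      (List.range 5).foldl (fun acc c =>
        if ((board.getD r []).getD c "") = "d" then acc ++ [((r : Int), (c : Int))] else acc)
        acc) []
  if dirts.length = 0 then (-1, -1)
  else
    let distances : List Int :=
      dirts.foldl (fun acc p => acc ++ [|p.1 - posr| + |p.2 - posc|]) []
    let minInit : Int := distances.getD 0 0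
    let fin : Int × Nat :=
      (List.range distances.length).foldl
        (fun s i => if distances.getD i 0 < s.1 then (distances.getD i 0, i) else s)
        (minInit, 0)
    dirts.getD fin.2 (0, 0)

-- ===== PORT B =====
-- literal transliteration of Source B: a single pass holding an optional (bestDist, bestR, bestC).
def closestDirt_alt (posr : Int) (posc : Int) (board : List (List String)) : Int × Int :=
  let best : Option (Int × Int × Int) :=
    (List.range 5).foldl (fun acc r =>
      (List.range 5).foldl (fun acc c =>
        if ((board.getD r []).getD c "") = "d" then
          let d : Int := |(r : Int) - posr| + |(c : Int) - posc|
          match acc with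
          | none => some (d, (r : Int), (c : Int))
          | some (bd, _, _) => if d < bd then some (d, (r : Int), (c : Int)) else acc
        else acc) acc) none
  match best with
  | none => (-1, -1)
  | some (_, r, c) => (r, c)

-- ===== PRECONDITION & SPEC =====
-- Pre_: A indexes board[r][c] for all 0 ≤ r,c < 5, so it raises IndexError unless the board
-- has at least 5 rows whose first 5 each have at least 5 cells; exactly those inputs are admitted.
def Pre_closestDirt (posr : Int) (posc : Int) (board : List (List String)) : Prop :=
  5 ≤ board.length ∧ ∀ row ∈ board.take 5, 5 ≤ row.length
instance (posr : Int) (posc : Int) (board : List (List String)) : Decidable (Pre_closestDirt posr posc board) := by unfold Pre_closestDirt; infer_instance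

def pvWitness_closestDirt : Int × Int × List (List String) :=
  (2, 3, [[".", ".", ".", ".", "."],
          [".", "d", ".", ".", "."],
          [".", ".", ".", "d", "."],
          [".", ".", ".", ".", "."],
          [".", ".", "d", ".", "."]])

def Spec_closestDirt (posr : Int) (posc : Int) (board : List (List String)) (out : Int × Int) : Prop := out = closestDirt_alt posr posc board
instance (posr : Int) (posc : Int) (board : List (List String)) (out : Int × Int) : Decidable (Spec_closestDirt posr posc board out) := by unfold Spec_closestDirt; infer_instance

-- ===== CLAIM (what is proved, stated in full; the proofs are below) =====
def Claim_equal_closestDirt : Prop := ∀ (posr : Int) (posc : Int) (board : List (List String)), Dom_closestDirt posr posc board → Pre_closestDirt posr posc board → Spec_closestDirt posr posc board (closestDirt posr posc board)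

-- ===== LEMMAS AND PROOFS =====

-- distance of a dirt cell from the bot
def pdist (posr posc : Int) (p : Int × Int) : Int := |p.1 - posr| + |p.2 - posc|

-- the common reference function: first strict minimum, scanning left to right
def firstMin (posr posc : Int) : Int × Int → Int → List (Int × Int) → Int × Int
  | b, _, [] => b
  | b, m, p :: t =>
      if pdist posr posc p < m then firstMin posr posc p (pdist posr posc p) t
      else firstMin posr posc b m t

-- B's per-dirt step
def bstep (posr posc : Int) (acc : Option (Int × Int × Int)) (p : Int × Int) : Option (Int × Int × Int) :=
  match acc with
  | none => some (pdist posr posc p, p.1, p.2)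
  | some (bd, _, _) => if pdist posr posc p < bd then some (pdist posr posc p, p.1, p.2) else acc


-- coordinates visited by both ports, in row-major order
def pvCoords : List (Nat × Nat) :=
  (List.range 5).flatMap (fun r => (List.range 5).map (fun c => (r, c)))

def castP (q : Nat × Nat) : Int × Int := ((q.1 : Int), (q.2 : Int))

-- extraction of B's final state
def extractB : Option (Int × Int × Int) → Int × Int
  | none => (-1, -1)
  | some (_, r, c) => (r, c)

theorem nest5 {α : Type} (f : α → Nat → Nat → α) (i : α) :
    (List.range 5).foldl (fun a r => (List.range 5).foldl (fun a c => f a r c) a) i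
      = pvCoords.foldl (fun a q => f a q.1 q.2) i := rfl

theorem collect_eq (c : Nat × Nat → Prop) [DecidablePred c] (L : List (Nat × Nat))
    (a0 : List (Int × Int)) :
    L.foldl (fun a q => if c q then a ++ [((q.1 : Int), (q.2 : Int))] else a) a0
      = a0 ++ (L.filter (fun q => decide (c q))).map castP := by
  induction L generalizing a0 with
  | nil => simp
  | cons q t ih =>
    by_cases h : c q <;> simp [h, ih, castP]

theorem select_eq (posr posc : Int) (c : Nat × Nat → Prop) [DecidablePred c]
    (L : List (Nat × Nat)) (s0 : Option (Int × Int × Int)) :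
    L.foldl (fun acc q => if c q then
        (let d : Int := |(q.1 : Int) - posr| + |(q.2 : Int) - posc|
         match acc with
         | none => some (d, (q.1 : Int), (q.2 : Int))
         | some (bd, _, _) => if d < bd then some (d, (q.1 : Int), (q.2 : Int)) else acc)
      else acc) s0
      = ((L.filter (fun q => decide (c q))).map castP).foldl (bstep posr posc) s0 := by
  induction L generalizing s0 with
  | nil => simp
  | cons q t ih =>
    by_cases h : c q
    · have hb : (let d : Int := |(q.1 : Int) - posr| + |(q.2 : Int) - posc|
         match s0 with
         | none => some (d, (q.1 : Int), (q.2 : Int))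
         | some (bd, _, _) => if d < bd then some (d, (q.1 : Int), (q.2 : Int)) else s0)
          = bstep posr posc s0 (castP q) := by
        cases s0 <;> rfl
      simp [h, ih, hb]
    · simp [h, ih]

theorem foldl_append_map (h : Int × Int → Int) (l : List (Int × Int)) (a0 : List Int) :
    l.foldl (fun a p => a ++ [h p]) a0 = a0 ++ l.map h := by
  induction l generalizing a0 with
  | nil => simp
  | cons p t ih => simp [ih]

theorem B1 (posr posc : Int) (t : List (Int × Int)) :
    ∀ (m : Int) (b : Int × Int),
      extractB (t.foldl (bstep posr posc) (some (m, b.1, b.2)))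
        = firstMin posr posc b m t := by
  induction t with
  | nil => intro m b; rfl
  | cons p t ih =>
    intro m b
    by_cases h : pdist posr posc p < m
    · simp [List.foldl_cons, bstep, firstMin, h, ih (pdist posr posc p) p]
    · simp [List.foldl_cons, bstep, firstMin, h, ih m b]

theorem scanA (posr posc : Int) (ds : List (Int × Int)) :
    ∀ (n k : Nat) (m : Int) (idx : Nat) (b : Int × Int),
      k + n = ds.length → ds.getD idx (0, 0) = b →
      ds.getD ((List.range' k n).foldl
          (fun s i => if (ds.map (pdist posr posc)).getD i 0 < s.1
                      then ((ds.map (pdist posr posc)).getD i 0, i) else s)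
          (m, idx)).2 (0, 0)
        = firstMin posr posc b m (ds.drop k) := by
  intro n
  induction n with
  | zero =>
    intro k m idx b hk hb
    have h0 : ds.drop k = [] := by
      apply List.drop_eq_nil_of_le; omega
    rw [h0]
    simpa [firstMin, List.range', List.getD] using hb
  | succ n ih =>
    intro k m idx b hk hb
    have hklt : k < ds.length := by omega
    have hDk : (ds.map (pdist posr posc)).getD k 0 = pdist posr posc ds[k] := by
      have hk2 : k < (ds.map (pdist posr posc)).length := by simpa using hklt
      rw [List.getD_eq_getElem _ _ hk2]
      simp
    have hdrop : ds.drop k = ds[k] :: ds.drop (k + 1) := List.drop_eq_getElem_cons hklt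
    rw [List.range'_succ, List.foldl_cons, hdrop]
    by_cases h : pdist posr posc ds[k] < m
    · rw [if_pos (by rw [hDk]; exact h)]
      rw [hDk]
      rw [ih (k + 1) (pdist posr posc ds[k]) k ds[k] (by omega)
          (List.getD_eq_getElem ds (0, 0) hklt)]
      simp [firstMin, h]
    · rw [if_neg (by rw [hDk]; exact h)]
      rw [ih (k + 1) m idx b (by omega) hb]
      simp [firstMin, h]

set_option maxHeartbeats 1000000 in
theorem closestDirt_spec : Claim_equal_closestDirt := by
  intro posr posc board _ _
  unfold Spec_closestDirt closestDirt closestDirt_alt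
  rw [nest5 (fun a r c => if ((board.getD r []).getD c "") = "d"
        then a ++ [((r : Int), (c : Int))] else a)]
  rw [nest5 (fun (acc : Option (Int × Int × Int)) (r c : Nat) =>
      if ((board.getD r []).getD c "") = "d" then
        (let d : Int := |(r : Int) - posr| + |(c : Int) - posc|
         match acc with
         | none => some (d, (r : Int), (c : Int))
         | some (bd, _, _) => if d < bd then some (d, (r : Int), (c : Int)) else acc)
      else acc)]
  rw [collect_eq (fun q => ((board.getD q.1 []).getD q.2 "") = "d") pvCoords []]
  rw [select_eq posr posc (fun q => ((board.getD q.1 []).getD q.2 "") = "d") pvCoords none]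
  set ds := ((pvCoords.filter
      (fun q => decide (((board.getD q.1 []).getD q.2 "") = "d"))).map castP) with hds
  rw [List.nil_append]
  cases ds with
  | nil => rfl
  | cons p t =>
    dsimp only
    rw [foldl_append_map (fun p => |p.1 - posr| + |p.2 - posc|) (p :: t) []]
    rw [List.nil_append]
    have hmap : (p :: t).map (fun p : Int × Int => |p.1 - posr| + |p.2 - posc|)
        = (p :: t).map (pdist posr posc) := rfl
    rw [hmap]
    have hlen : ((p :: t).map (pdist posr posc)).length = (p :: t).length := by simp
    simp only [if_neg (by simp : ¬ ((p :: t).length = 0)), hlen, List.range_eq_range']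
    have hinit : ((p :: t).map (pdist posr posc)).getD 0 0 = pdist posr posc p := rfl
    rw [hinit]
    rw [scanA posr posc (p :: t) (p :: t).length 0 (pdist posr posc p) 0 p
        (by omega) rfl]
    rw [List.drop_zero]
    have hA : firstMin posr posc p (pdist posr posc p) (p :: t)
        = firstMin posr posc p (pdist posr posc p) t := by
      simp [firstMin]
    rw [hA]
    rw [List.foldl_cons]
    have hB : bstep posr posc none p = some (pdist posr posc p, p.1, p.2) := rfl
    rw [hB]
    have hE : ∀ X : Option (Int × Int × Int),
        (match X with
         | none => ((-1 : Int), (-1 : Int))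
         | some (_, r, c) => (r, c)) = extractB X := by
      intro X; cases X <;> rfl
    rw [hE]
    rw [B1 posr posc t (pdist posr posc p) p]
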